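-- pv_equiv track=rewrite | github.com/Garibov2001/HackerRank | 41. Any or All.py | isPositive
-- ===== SOURCE A (Python) =====
-- def isPositive(myList):
--     isPositiveList = []
--     for i in range(0, len(myList)):
--         if(int(myList[i])>0):
--             isPositiveList.append(True)
--         else:
--             isPositiveList.append(False)
--             return isPositiveList
--     return isPositiveList
-- ===== SOURCE B (Python) =====
-- def isPositive(myList):
--     # Divide and conquer: solve each half independently; the left half's
--     # answer is final unless it certifies the whole half positive, in which
--     # case it is extended by the right half's answer. Recursion depth O(log n).
--     n = len(myList)
--     if n == 0:
--         return []
--     if n == 1: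
--         return [True] if int(myList[0]) > 0 else [False]
--     mid = n // 2
--     left = isPositive(myList[:mid])
--     if left[-1] is False:
--         return left
--     return left + isPositive(myList[mid:])
-- ===== Notes on version B (the rewrite author's own statement) =====
-- stated objective: alternative
-- what changed: B replaces A's forward index loop with an append-accumulator by a divide-and-conquer recursion that solves the two halves independently and keeps the left half's answer unless it certifies the whole half positive.
import Mathlib
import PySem

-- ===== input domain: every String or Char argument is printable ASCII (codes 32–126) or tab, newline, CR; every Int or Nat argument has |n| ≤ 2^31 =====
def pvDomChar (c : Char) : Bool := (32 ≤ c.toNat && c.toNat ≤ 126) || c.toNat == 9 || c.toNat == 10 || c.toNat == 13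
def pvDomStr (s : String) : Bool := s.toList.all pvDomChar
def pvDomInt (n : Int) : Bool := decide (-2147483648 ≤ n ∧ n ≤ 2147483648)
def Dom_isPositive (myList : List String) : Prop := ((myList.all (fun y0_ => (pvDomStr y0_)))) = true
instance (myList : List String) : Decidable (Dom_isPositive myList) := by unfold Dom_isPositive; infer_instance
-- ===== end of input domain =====

-- B replaces A's forward index loop with an append-accumulator by a divide-and-conquer
-- recursion on the two halves of the list (alternative decomposition; same return values).


-- ===== PORT A =====
-- loop over i in range(0, len(myList)) with an append-accumulator; `none` = the ValueError of int(); early return on non-positive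
def isPositiveGo (myList : List String) (i : Nat) (acc : List Bool) : Option (List Bool) :=
  if h : i < myList.length then
    match PySem.Int.ofStr? myList[i] with
    | none => none
    | some v =>
      if v > 0 then isPositiveGo myList (i + 1) (acc ++ [true])
      else some (acc ++ [false])
  else some acc
termination_by myList.length - i

def isPositive (myList : List String) : List Bool :=
  (isPositiveGo myList 0 []).getD []

-- ===== PORT B =====
-- divide and conquer on the two halves; `none` = the ValueError of int().
-- n == 0 / n == 1 bases, then left = rec(first half); if left[-1] is False
-- it is the answer, otherwise left ++ rec(second half).
def isPositiveD : List String → Option (List Bool)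
  | [] => some []
  | [s] =>
    match PySem.Int.ofStr? s with
    | none => none
    | some v => if v > 0 then some [true] else some [false]
  | a :: b :: rest =>
    let mid := (a :: b :: rest).length / 2
    match isPositiveD ((a :: b :: rest).take mid) with
    | none => none
    | some left =>
      if left.getLast? = some false then some left
      else (isPositiveD ((a :: b :: rest).drop mid)).map (fun r => left ++ r)
termination_by l => l.length
decreasing_by
  · simp [List.length_take]; omega
  · simp [List.length_drop]; omega

def isPositive_alt (myList : List String) : List Bool :=
  (isPositiveD myList).getD []

-- ===== PRECONDITION & SPEC =====
-- Pre_ excludes exactly the inputs on which A's int() raises ValueError: an element that does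
-- not parse as an int and is preceded only by elements that parse as positive ints.
def Pre_isPositive (myList : List String) : Prop :=
  ∀ i, i < myList.length →
    (∀ k, k < i → 0 < (PySem.Int.ofStr? (myList.getD k "")).getD 0) →
    (PySem.Int.ofStr? (myList.getD i "")).isSome = true
instance (myList : List String) : Decidable (Pre_isPositive myList) := by
  unfold Pre_isPositive; infer_instance

def pvWitness_isPositive : List String := ["3", " +2 ", "0", "5"]

def Spec_isPositive (myList : List String) (out : List Bool) : Prop := out = isPositive_alt myList
instance (myList : List String) (out : List Bool) : Decidable (Spec_isPositive myList out) := by unfold Spec_isPositive; infer_instance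

-- ===== CLAIM (what is proved, stated in full; the proofs are below) =====
def Claim_equal_isPositive : Prop := ∀ (myList : List String), Dom_isPositive myList → Pre_isPositive myList → Spec_isPositive myList (isPositive myList)

-- ===== LEMMAS AND PROOFS =====

-- proof-only reference recursion: the straightforward structural recursion both ports compute
def linRec : List String → Option (List Bool)
  | [] => some []
  | s :: rest =>
    match PySem.Int.ofStr? s with
    | none => none
    | some v =>
      if v > 0 then (linRec rest).map (fun r => true :: r)
      else some [false]

-- A's index loop at position i, with accumulator acc, equals acc prepended to linRec of the suffix
theorem go_eq_lin (myList : List String) (i : Nat) (acc : List Bool) :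
    isPositiveGo myList i acc = (linRec (myList.drop i)).map (fun r => acc ++ r) := by
  induction hn : myList.length - i generalizing i acc with
  | zero =>
    unfold isPositiveGo
    rw [dif_neg (by omega)]
    rw [List.drop_eq_nil_of_le (by omega)]
    simp [linRec]
  | succ n ih =>
    have hi : i < myList.length := by omega
    have hdrop : myList.drop i = myList[i] :: myList.drop (i + 1) :=
      List.drop_eq_getElem_cons hi
    unfold isPositiveGo
    rw [dif_pos hi, hdrop]
    cases hv : PySem.Int.ofStr? myList[i] with
    | none => simp [linRec, hv]
    | some v =>
      by_cases hpos : v > 0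
      · simp only [linRec, hv, if_pos hpos]
        rw [ih (i + 1) (acc ++ [true]) (by omega)]
        cases linRec (myList.drop (i + 1)) <;> simp
      · simp [linRec, hv, if_neg hpos]

-- how linRec splits over an append: the left part's answer is final iff it ends in false
theorem linRec_append (xs ys : List String) :
    linRec (xs ++ ys) =
      match linRec xs with
      | none => none
      | some r =>
        if r.getLast? = some false then some r
        else (linRec ys).map (fun t => r ++ t) := by
  induction xs with
  | nil =>
    simp only [List.nil_append, linRec]
    cases linRec ys <;> simp
  | cons s t ih =>
    simp only [List.cons_append, linRec]
    cases hv : PySem.Int.ofStr? s with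
    | none => simp
    | some v =>
      by_cases hpos : v > 0
      · simp only [if_pos hpos, ih]
        cases hrt : linRec t with
        | none => simp
        | some rt =>
          cases rt with
          | nil =>
            cases linRec ys <;> simp [List.getLast?]
          | cons x0 xrest =>
            by_cases hend : (x0 :: xrest).getLast? = some false
            · have hend' : (true :: x0 :: xrest).getLast? = some false := by
                simpa [List.getLast?_cons_cons] using hend
              simp [hend]
            · have hend' : ¬ (true :: x0 :: xrest).getLast? = some false := by
                simpa [List.getLast?_cons_cons] using hend
              cases linRec ys <;> simp [hend]
      · simp [if_neg hpos, List.getLast?]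

theorem d_eq_lin (l : List String) : isPositiveD l = linRec l := by
  generalize hn : l.length = n
  induction n using Nat.strong_induction_on generalizing l with
  | _ n ih =>
    match l, hn with
    | [], _ => simp [isPositiveD, linRec]
    | [s], _ =>
      simp only [isPositiveD, linRec]
      cases hv : PySem.Int.ofStr? s with
      | none => rfl
      | some v => by_cases hpos : v > 0 <;> simp [hpos]
    | a :: b :: rest, hn =>
      simp only [isPositiveD]
      have hlen : (a :: b :: rest).length = n := hn
      have hmidlt : (a :: b :: rest).length / 2 < n := by simp at hlen ⊢; omega
      have hmidpos : 1 ≤ (a :: b :: rest).length / 2 := by simp; omega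
      rw [ih _ (by rw [List.length_take]; omega) _ rfl,
          ih _ (by rw [List.length_drop]; omega) _ rfl]
      have hsplit : (a :: b :: rest) =
          (a :: b :: rest).take ((a :: b :: rest).length / 2) ++
          (a :: b :: rest).drop ((a :: b :: rest).length / 2) := by
        rw [List.take_append_drop]
      conv_rhs => rw [hsplit]
      rw [linRec_append]

theorem ports_agree (myList : List String) : isPositive myList = isPositive_alt myList := by
  unfold isPositive isPositive_alt
  rw [go_eq_lin, List.drop_zero, d_eq_lin]
  cases linRec myList <;> simp

-- ===== VERDICT (by name: the statement is the Claim_ definition above) =====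
theorem isPositive_spec : Claim_equal_isPositive := by
  intro myList _ _
  unfold Spec_isPositive
  exact ports_agree myList
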